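-- pv_equiv track=rewrite | github.com/panthistle/mcuboid | ops.py | __lnk_plane_seams
-- ===== SOURCE A (Python) =====
-- def __lnk_plane_seams(apts, bpts, lscan):
--     ares = apts - 1
--     bres = bpts - 1
--     npts = apts * bpts
--     return [
--             [lscan[i] for i in range(apts)],
--             [lscan[ares + i * apts] for i in range(bpts)],
--             [lscan[i] for i in range(bres * apts, npts)],
--             [lscan[i * apts] for i in range(bpts)]
--             ]
-- ===== SOURCE B (Python) =====
-- def __lnk_plane_seams(apts, bpts, lscan):
--     grid = [lscan[r * apts:(r + 1) * apts] for r in range(bpts)]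
--     cols = [[row[c] for row in grid] for c in range(apts)]
--     return [
--             [col[0] for col in cols],
--             [row[-1] for row in grid],
--             [col[-1] for col in cols],
--             [row[0] for row in grid],
--             ]
-- ===== Notes on version B (the rewrite author's own statement) =====
-- stated objective: alternative
-- what changed: B reshapes the flat array into a 2-D grid and its transposed column list and reads the four seams as first/last entries of the columns and of the rows, instead of A's four independent flat-index comprehensions.
-- outside the precondition, e.g. on __lnk_plane_seams(3, 0, [1, 2, 3]): A returns [[1, 2, 3], [], [1, 2, 3], []], B raises IndexError; on __lnk_plane_seams(0, 2, [5]): A returns [[], [5, 5], [], [5, 5]], B raises IndexError; on __lnk_plane_seams(-2, 2, [1, 2, 3, 4, 5, 6]): A returns [[], [4, 2], [], [1, 5]], B raises IndexError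
import Mathlib
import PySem

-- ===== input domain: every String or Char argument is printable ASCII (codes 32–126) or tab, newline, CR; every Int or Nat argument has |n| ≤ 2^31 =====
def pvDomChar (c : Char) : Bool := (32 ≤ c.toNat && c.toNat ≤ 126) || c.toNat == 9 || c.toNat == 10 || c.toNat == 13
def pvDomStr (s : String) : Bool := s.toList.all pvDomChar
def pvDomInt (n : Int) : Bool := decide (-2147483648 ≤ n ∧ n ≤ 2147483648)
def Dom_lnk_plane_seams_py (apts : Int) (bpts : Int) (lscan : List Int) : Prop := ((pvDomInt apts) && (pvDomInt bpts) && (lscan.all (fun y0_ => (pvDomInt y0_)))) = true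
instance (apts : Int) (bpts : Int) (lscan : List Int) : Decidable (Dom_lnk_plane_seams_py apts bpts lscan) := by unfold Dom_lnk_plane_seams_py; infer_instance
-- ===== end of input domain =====

-- B reshapes the flat array into a 2-D grid and its transposed column list and reads the four
-- seams as first/last entries of the columns and of the rows (alternative decomposition; same
-- return value on Pre_).

-- ===== PORT A =====
def lnk_plane_seams_py (apts : Int) (bpts : Int) (lscan : List Int) : List (List Int) :=
  let ares := apts - 1
  let bres := bpts - 1
  let npts := apts * bpts
  [ (PySem.List.pyRange 0 apts 1).map (fun i => PySem.List.pyGetD lscan i 0),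
    (PySem.List.pyRange 0 bpts 1).map (fun i => PySem.List.pyGetD lscan (ares + i * apts) 0),
    (PySem.List.pyRange (bres * apts) npts 1).map (fun i => PySem.List.pyGetD lscan i 0),
    (PySem.List.pyRange 0 bpts 1).map (fun i => PySem.List.pyGetD lscan (i * apts) 0) ]

-- ===== PORT B =====
def lnk_plane_seams_py_alt (apts : Int) (bpts : Int) (lscan : List Int) : List (List Int) :=
  let grid := (PySem.List.pyRange 0 bpts 1).map
    (fun r => PySem.List.slice lscan (some (r * apts)) (some ((r + 1) * apts)))
  let cols := (PySem.List.pyRange 0 apts 1).map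
    (fun c => grid.map (fun row => PySem.List.pyGetD row c 0))
  [ cols.map (fun col => PySem.List.pyGetD col 0 0),
    grid.map (fun row => PySem.List.pyGetD row (-1) 0),
    cols.map (fun col => PySem.List.pyGetD col (-1) 0),
    grid.map (fun row => PySem.List.pyGetD row 0 0) ]

-- ===== PRECONDITION & SPEC =====
-- Pre_ admits the whole natural domain (a genuine apts × bpts grid inside lscan) and every
-- degenerate case on which the two programs still agree (apts ≤ 0 ∧ bpts ≤ 0, and the
-- negative-width single row apts < 0 ∧ bpts = 1).  It EXCLUDES (a) inputs where A itself raises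
-- IndexError (lscan too short for the indices A reads), and (b) the remaining mixed-sign
-- degenerate dimensions (e.g. bpts = 0 with apts ≥ 1, or apts ≤ 0 with bpts ≥ 2): there A
-- RETURNS seams assembled by Python's negative-index wraparound on the flat array, but B's grid
-- reshape has no row (or no column) to index and RAISES IndexError, so these inputs cannot be
-- matched by B and are excluded — see the cites in claim.json for concrete examples.
def Pre_lnk_plane_seams_py (apts : Int) (bpts : Int) (lscan : List Int) : Prop :=
  (1 ≤ apts ∧ 1 ≤ bpts ∧ apts * bpts ≤ lscan.length) ∨ (apts ≤ 0 ∧ bpts ≤ 0) ∨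
    (apts < 0 ∧ bpts = 1 ∧ 1 - apts ≤ lscan.length)

instance (apts : Int) (bpts : Int) (lscan : List Int) : Decidable (Pre_lnk_plane_seams_py apts bpts lscan) := by
  unfold Pre_lnk_plane_seams_py; infer_instance

def pvWitness_lnk_plane_seams_py : Int × Int × List Int := (2, 3, [1, 2, 3, 4, 5, 6])

def Spec_lnk_plane_seams_py (apts : Int) (bpts : Int) (lscan : List Int) (out : List (List Int)) : Prop := out = lnk_plane_seams_py_alt apts bpts lscan
instance (apts : Int) (bpts : Int) (lscan : List Int) (out : List (List Int)) : Decidable (Spec_lnk_plane_seams_py apts bpts lscan out) := by unfold Spec_lnk_plane_seams_py; infer_instance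

-- ===== CLAIM (what is proved, stated in full; the proofs are below) =====
def Claim_equal_lnk_plane_seams_py : Prop := ∀ (apts : Int) (bpts : Int) (lscan : List Int), Dom_lnk_plane_seams_py apts bpts lscan → Pre_lnk_plane_seams_py apts bpts lscan → Spec_lnk_plane_seams_py apts bpts lscan (lnk_plane_seams_py apts bpts lscan)

-- ===== LEMMAS AND PROOFS =====

-- reading one cell of a row (a contiguous block of the flat array)
lemma row_get (lscan : List Int) (off a c : Nat) (h : off + a ≤ lscan.length) (hc : c < a) :
    PySem.List.pyGetD ((lscan.drop off).take a) (c : Int) 0 = lscan.getD (off + c) 0 := by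
  have hlen : ((lscan.drop off).take a).length = a := by simp; omega
  have h1 : off + c < lscan.length := by omega
  rw [PySem.List.pyGetD_natCast, List.getD_eq_getElem _ 0 (by omega : c < ((lscan.drop off).take a).length),
      List.getD_eq_getElem lscan 0 h1]
  simp [List.getElem_take, List.getElem_drop]

-- last element of a row
lemma row_last (lscan : List Int) (off a : Nat) (h : off + a ≤ lscan.length) (ha : 1 ≤ a) :
    PySem.List.pyGetD ((lscan.drop off).take a) (-1) 0 = lscan.getD (a - 1 + off) 0 := by
  have hlen : ((lscan.drop off).take a).length = a := by simp; omega
  have hne : (lscan.drop off).take a ≠ [] := by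
    intro e; rw [e] at hlen; simp at hlen; omega
  rw [PySem.List.pyGetD_neg_one _ _ hne, List.getLast_eq_getElem]
  have h1 : a - 1 + off < lscan.length := by omega
  rw [List.getD_eq_getElem lscan 0 h1]
  simp [hlen, List.getElem_take, List.getElem_drop]
  congr 1
  omega

-- first element of a row
lemma row_first (lscan : List Int) (off a : Nat) (h : off + a ≤ lscan.length) (ha : 1 ≤ a) :
    PySem.List.pyGetD ((lscan.drop off).take a) 0 0 = lscan.getD off 0 := by
  have hlen : ((lscan.drop off).take a).length = a := by simp; omega
  have h0 : 0 < ((lscan.drop off).take a).length := by omega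
  have h1 : off < lscan.length := by omega
  rw [PySem.List.pyGetD_zero, List.getD_eq_getElem _ 0 h0, List.getD_eq_getElem lscan 0 h1]
  simp [List.getElem_take, List.getElem_drop]

-- last element of a column (a map over the row indices)
lemma getLast_map_range {β : Type} (f : Nat → β) (b : Nat) (h : (List.range b).map f ≠ []) :
    ((List.range b).map f).getLast h = f (b - 1) := by
  have hb : 1 ≤ b := by
    by_contra hb
    have : b = 0 := by omega
    subst this; simp at h
  rw [List.getLast_eq_getElem]
  simp [List.getElem_range]

lemma main_equiv (apts bpts : Int) (lscan : List Int)
    (h : Pre_lnk_plane_seams_py apts bpts lscan) :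
    lnk_plane_seams_py apts bpts lscan = lnk_plane_seams_py_alt apts bpts lscan := by
  rcases h with ⟨ha, hb, hlen⟩ | ⟨ha, hb⟩ | ⟨ha, hb, hlen⟩
  · -- main case: a genuine apts × bpts grid inside the flat array
    lift apts to ℕ using (by omega) with a
    lift bpts to ℕ using (by omega) with b
    have ha' : 1 ≤ a := by exact_mod_cast ha
    have hb' : 1 ≤ b := by exact_mod_cast hb
    have hlen' : a * b ≤ lscan.length := by exact_mod_cast hlen
    have hrowlen : ∀ k : Nat, k < b → k * a + a ≤ lscan.length := by
      intro k hk
      have h1 : (k + 1) * a ≤ b * a := Nat.mul_le_mul_right a (by omega)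
      rw [Nat.add_mul, Nat.mul_comm b a] at h1
      omega
    simp only [lnk_plane_seams_py, lnk_plane_seams_py_alt]
    have hgrid : ((PySem.List.pyRange 0 (b : Int) 1).map
        (fun r => PySem.List.slice lscan (some (r * (a : Int))) (some ((r + 1) * (a : Int))))) =
        (List.range b).map (fun k => (lscan.drop (k * a)).take a) := by
      rw [PySem.List.pyRange_zero_natCast, List.map_map]
      apply List.map_congr_left
      intro k _
      show PySem.List.slice lscan (some ((k : Int) * a)) (some (((k : Int) + 1) * a)) = _
      have e1 : ((k : Int) * a) = ((k * a : Nat) : Int) := by push_cast; ring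
      have e2 : (((k : Int) + 1) * a) = ((k * a : Nat) : Int) + ((a : Nat) : Int) := by push_cast; ring
      rw [e1, e2, PySem.List.slice_natCast_add]
    rw [hgrid]
    simp only [List.cons.injEq, and_true]
    refine ⟨?_, ?_, ?_, ?_⟩
    · -- seam 1: first elements of the columns = first row
      rw [PySem.List.pyRange_zero_natCast (n := a), List.map_map, List.map_map, List.map_map]
      apply List.map_congr_left
      intro c hc
      have hc' : c < a := List.mem_range.mp hc
      simp only [Function.comp_def]
      show PySem.List.pyGetD lscan (c : Int) 0 = _
      have hrow0 : 0 * a + a ≤ lscan.length := hrowlen 0 (by omega)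
      calc PySem.List.pyGetD lscan (c : Int) 0
          = lscan.getD (0 * a + c) 0 := by rw [PySem.List.pyGetD_natCast]; simp
        _ = PySem.List.pyGetD ((lscan.drop (0 * a)).take a) (c : Int) 0 :=
            (row_get lscan (0 * a) a c hrow0 hc').symm
        _ = _ := by
            show _ = PySem.List.pyGetD
              (((List.range b).map (fun k => (lscan.drop (k * a)).take a)).map
                (fun row => PySem.List.pyGetD row (c : Int) 0)) 0 0
            rw [List.map_map, PySem.List.pyGetD_zero,
                PySem.List.getD_map_range _ _ _ _ (by omega : 0 < b)]
            rfl
    · -- seam 2: right column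
      rw [PySem.List.pyRange_zero_natCast, List.map_map, List.map_map]
      apply List.map_congr_left
      intro k hk
      have hk' : k < b := List.mem_range.mp hk
      simp only [Function.comp_def]
      show PySem.List.pyGetD lscan ((a : Int) - 1 + (k : Int) * a) 0 = _
      have e1 : ((a : Int) - 1 + (k : Int) * a) = ((a - 1 + k * a : Nat) : Int) := by
        push_cast [Nat.cast_sub ha']; ring
      rw [e1, PySem.List.pyGetD_natCast, ← row_last lscan (k * a) a (hrowlen k hk') ha']
    · -- seam 3: last elements of the columns = last row
      have e0 : ((b : Int) - 1) * a = (((b - 1) * a : Nat) : Int) := by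
        push_cast [Nat.cast_sub hb']; ring
      have e1 : (a : Int) * b = ((a * b : Nat) : Int) := by push_cast; ring
      rw [e0, e1]
      have hba : (b - 1) * a + a = a * b := by
        have hb1 : b - 1 + 1 = b := by omega
        calc (b - 1) * a + a = (b - 1 + 1) * a := by rw [Nat.add_mul, Nat.one_mul]
          _ = a * b := by rw [hb1, Nat.mul_comm]
      have e2 : PySem.List.pyRange (((b - 1) * a : Nat) : Int) ((a * b : Nat) : Int) 1 =
          (List.range a).map (fun k => (((b - 1) * a + k : Nat) : Int)) := by
        rw [PySem.List.pyRange_one]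
        have e3 : (((a * b : Nat) : Int) - ((b - 1) * a : Nat)).toNat = a := by omega
        rw [e3]
        apply List.map_congr_left
        intro k _
        push_cast
        ring
      rw [e2, List.map_map, PySem.List.pyRange_zero_natCast (n := a), List.map_map, List.map_map]
      apply List.map_congr_left
      intro c hc
      have hc' : c < a := List.mem_range.mp hc
      simp only [Function.comp_def]
      have hoffb : (b - 1) * a + a ≤ lscan.length := hrowlen (b - 1) (by omega)
      show PySem.List.pyGetD lscan (((b - 1) * a + c : Nat) : Int) 0 = _
      have hcolne : ((List.range b).map
          (fun k => PySem.List.pyGetD ((lscan.drop (k * a)).take a) (c : Int) 0)) ≠ [] := by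
        simp; omega
      calc PySem.List.pyGetD lscan (((b - 1) * a + c : Nat) : Int) 0
          = lscan.getD ((b - 1) * a + c) 0 := by rw [PySem.List.pyGetD_natCast]
        _ = PySem.List.pyGetD ((lscan.drop ((b - 1) * a)).take a) (c : Int) 0 :=
            (row_get lscan ((b - 1) * a) a c hoffb hc').symm
        _ = _ := by
            show _ = PySem.List.pyGetD
              (((List.range b).map (fun k => (lscan.drop (k * a)).take a)).map
                (fun row => PySem.List.pyGetD row (c : Int) 0)) (-1) 0
            rw [List.map_map]
            simp only [Function.comp_def]
            rw [PySem.List.pyGetD_neg_one _ _ hcolne, getLast_map_range]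
    · -- seam 4: left column
      rw [PySem.List.pyRange_zero_natCast, List.map_map, List.map_map]
      apply List.map_congr_left
      intro k hk
      have hk' : k < b := List.mem_range.mp hk
      simp only [Function.comp_def]
      show PySem.List.pyGetD lscan ((k : Int) * a) 0 = _
      have e1 : ((k : Int) * a) = ((k * a : Nat) : Int) := by push_cast; ring
      rw [e1, PySem.List.pyGetD_natCast, ← row_first lscan (k * a) a (hrowlen k hk') ha']
  · -- degenerate case: apts ≤ 0 and bpts ≤ 0, every seam is empty on both sides
    simp only [lnk_plane_seams_py, lnk_plane_seams_py_alt]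
    rw [PySem.List.pyRange_one_eq_nil (show apts ≤ 0 from ha),
        PySem.List.pyRange_one_eq_nil (show bpts ≤ 0 from hb),
        PySem.List.pyRange_one_eq_nil (show apts * bpts ≤ (bpts - 1) * apts by nlinarith)]
    simp
  · -- single negative-width row: apts < 0, bpts = 1, list long enough — both read the same cells
    subst hb
    obtain ⟨k, rfl⟩ : ∃ k : ℕ, apts = -(k : Int) := ⟨(-apts).toNat, by omega⟩
    have hk1 : 1 ≤ k := by omega
    have hkl : k + 1 ≤ lscan.length := by omega
    simp only [lnk_plane_seams_py, lnk_plane_seams_py_alt]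
    rw [PySem.List.pyRange_one_eq_nil (show -(k : Int) ≤ 0 by omega),
        show ((1 : Int) - 1) * -(k : Int) = 0 by ring, show -(k : Int) * 1 = -(k : Int) by ring,
        PySem.List.pyRange_one_eq_nil (show -(k : Int) ≤ 0 by omega),
        PySem.List.pyRange_one_cons (show (0 : Int) < 1 by norm_num),
        PySem.List.pyRange_one_eq_nil (show (1 : Int) ≤ 0 + 1 by norm_num)]
    simp only [List.map_cons, List.map_nil, List.cons.injEq, and_true, true_and]
    have hrow : PySem.List.slice lscan (some ((0 : Int) * -(k : Int)))
        (some (((0 : Int) + 1) * -(k : Int))) = lscan.take (lscan.length - k) := by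
      rw [show ((0 : Int) * -(k : Int)) = ((0 : Nat) : Int) by ring,
          show (((0 : Int) + 1) * -(k : Int)) = -(k : Int) by ring]
      simp only [Nat.cast_zero, PySem.List.slice_zero_start]
      exact PySem.List.slice_to_neg_natCast lscan k (by omega)
    have hrowlen : (lscan.take (lscan.length - k)).length = lscan.length - k := by
      simp
    have hrowne : lscan.take (lscan.length - k) ≠ [] := by
      intro e; rw [e] at hrowlen; simp at hrowlen; omega
    refine ⟨?_, ?_⟩
    · -- seam 2 = the single row's last element
      have e1 : (-(k : Int) - 1 + 0 * -(k : Int)) = -((k + 1 : Nat) : Int) := by push_cast; ring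
      rw [e1, PySem.List.pyGetD_neg_natCast lscan (k + 1) 0 (by omega) hkl, hrow,
          PySem.List.pyGetD_neg_one _ _ hrowne, List.getLast_eq_getElem]
      simp only [hrowlen]
      rw [List.getElem_take]
      simp only [Nat.sub_sub]
    · -- seam 4 = the single row's first element
      rw [hrow, show ((0 : Int) * -(k : Int)) = 0 by ring,
          PySem.List.pyGetD_zero, PySem.List.pyGetD_zero,
          List.getD_eq_getElem lscan 0 (by omega : 0 < lscan.length),
          List.getD_eq_getElem _ 0 (by omega : 0 < (lscan.take (lscan.length - k)).length)]
      simp [List.getElem_take]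

-- ===== VERDICT (by name: the statement is the Claim_ definition above) =====
theorem lnk_plane_seams_py_spec : Claim_equal_lnk_plane_seams_py := by
  intro apts bpts lscan _ hpre
  exact main_equiv apts bpts lscan hpre
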